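-- pv_equiv track=rewrite | github.com/Proxyfil/PolytechInfo | Semestre 1/TP6/ex11.py | memesLettres
-- ===== SOURCE A (Python) =====
-- def memesLettres(s1,s2):
--     for i in s1:
--         if(i not in s2):
--             return False
--     for i in s2:
--         if(i not in s1):
--             return False
--     return True
-- ===== SOURCE B (Python) =====
-- def memesLettres(s1, s2):
--     return sorted(set(s1)) == sorted(set(s2))
-- ===== Notes on version B (the rewrite author's own statement) =====
-- stated objective: simpler
-- what changed: Replaces the two nested membership-scan loops with a normalize-then-compare pass: deduplicate each string's characters, sort the distinct letters, and compare the two sorted sequences for equality.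
import Mathlib
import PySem

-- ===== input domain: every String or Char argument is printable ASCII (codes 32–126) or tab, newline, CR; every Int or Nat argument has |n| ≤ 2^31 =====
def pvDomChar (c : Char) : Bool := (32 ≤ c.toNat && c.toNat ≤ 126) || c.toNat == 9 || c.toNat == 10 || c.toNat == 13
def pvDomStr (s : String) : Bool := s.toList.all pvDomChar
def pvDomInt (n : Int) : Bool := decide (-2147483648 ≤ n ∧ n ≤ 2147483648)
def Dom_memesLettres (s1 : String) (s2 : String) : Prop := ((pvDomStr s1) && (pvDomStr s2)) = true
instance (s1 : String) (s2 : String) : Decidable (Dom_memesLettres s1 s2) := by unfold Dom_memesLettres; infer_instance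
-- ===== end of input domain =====

-- B replaces A's two membership-scan loops by comparing the sorted distinct characters of each string (simpler, one normalize-then-compare pass).

-- ===== PORT A =====
-- the 'for i in sX: if i not in sY: return False' loop, early return and all
def mlLoop (cs : List Char) (other : List Char) : Bool :=
  match cs with
  | [] => true
  | c :: t => if !(other.contains c) then false else mlLoop t other

def memesLettres (s1 : String) (s2 : String) : Bool :=
  mlLoop s1.toList s2.toList && mlLoop s2.toList s1.toList

-- ===== PORT B =====
def memesLettres_alt (s1 : String) (s2 : String) : Bool :=
  decide (PySem.List.sorted (PySem.Set.ofList s1.toList) (fun x => x) false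
        = PySem.List.sorted (PySem.Set.ofList s2.toList) (fun x => x) false)

-- ===== PRECONDITION & SPEC =====
def Spec_memesLettres (s1 : String) (s2 : String) (out : Bool) : Prop := out = memesLettres_alt s1 s2
instance (s1 : String) (s2 : String) (out : Bool) : Decidable (Spec_memesLettres s1 s2 out) := by unfold Spec_memesLettres; infer_instance

-- ===== CLAIM (what is proved, stated in full; the proofs are below) =====
def Claim_equal_memesLettres : Prop := ∀ (s1 : String) (s2 : String), Dom_memesLettres s1 s2 → Spec_memesLettres s1 s2 (memesLettres s1 s2)

-- ===== LEMMAS AND PROOFS =====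
theorem mlLoop_eq_true (cs other : List Char) :
    mlLoop cs other = true ↔ ∀ c ∈ cs, c ∈ other := by
  induction cs with
  | nil => simp [mlLoop]
  | cons c t ih => by_cases h : c ∈ other <;> simp [mlLoop, h, ih]

theorem mem_ofList_char (xs : List Char) (c : Char) :
    c ∈ PySem.Set.ofList xs ↔ c ∈ xs := PySem.Set.mem_ofList _ _

-- ===== VERDICT (by name: the statement is the Claim_ definition above) =====
theorem memesLettres_spec : Claim_equal_memesLettres := by
  intro s1 s2 _
  unfold Spec_memesLettres memesLettres memesLettres_alt
  rw [Bool.eq_iff_iff]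
  rw [Bool.and_eq_true, mlLoop_eq_true, mlLoop_eq_true, decide_eq_true_iff]
  rw [PySem.List.sorted_id_eq_sorted_id_iff_perm]
  rw [List.perm_ext_iff_of_nodup (PySem.Set.nodup_ofList _) (PySem.Set.nodup_ofList _)]
  constructor
  · rintro ⟨h1, h2⟩ c
    simp only [mem_ofList_char]
    exact ⟨fun h => h1 c h, fun h => h2 c h⟩
  · intro h
    exact ⟨fun c hc => (mem_ofList_char _ _).mp ((h c).mp ((mem_ofList_char _ _).mpr hc)),
           fun c hc => (mem_ofList_char _ _).mp ((h c).mpr ((mem_ofList_char _ _).mpr hc))⟩
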